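-- pv_equiv track=rewrite | github.com/CwnRheswm/curly-guide-google-code-challenge | bunny.py | solution
-- ===== SOURCE A (Python) =====
-- from itertools import combinations
--
-- def solution(n_buns, n_req):
--   num_bunnies_per_key = n_buns - n_req + 1
--   keys_to_distribute = [[] for w in range(n_buns)]
--   key_sets = list(combinations(range(n_buns), num_bunnies_per_key))
--   for key, bunnies in enumerate(key_sets):
--     for bunny in bunnies:
--       keys_to_distribute[bunny].append(key)
--   return keys_to_distribute
-- ===== SOURCE B (Python) =====
-- from itertools import combinations
--
-- def solution(n_buns, n_req):
--   key_sets = list(combinations(range(n_buns), n_buns - n_req + 1))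
--   return [[key for key, bunnies in enumerate(key_sets) if b in bunnies]
--           for b in range(n_buns)]
-- ===== Notes on version B (the rewrite author's own statement) =====
-- stated objective: alternative
-- what changed: A scatters keys into per-bunny lists by mutating an index during one forward pass over the combination list; B builds each bunny's list directly by a per-bunny gather (membership scan of the enumerated combination list), with no mutable result array.
import Mathlib
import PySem

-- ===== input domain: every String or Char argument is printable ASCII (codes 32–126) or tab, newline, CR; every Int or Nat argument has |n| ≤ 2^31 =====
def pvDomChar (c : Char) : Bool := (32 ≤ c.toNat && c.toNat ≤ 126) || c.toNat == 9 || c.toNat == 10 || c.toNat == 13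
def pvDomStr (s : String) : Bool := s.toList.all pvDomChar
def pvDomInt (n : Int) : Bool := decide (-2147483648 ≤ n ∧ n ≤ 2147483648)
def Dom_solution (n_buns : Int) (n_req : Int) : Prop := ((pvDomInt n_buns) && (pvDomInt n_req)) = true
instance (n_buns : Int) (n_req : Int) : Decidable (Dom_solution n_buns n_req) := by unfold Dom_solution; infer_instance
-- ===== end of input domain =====

-- B builds each bunny's key list by a per-bunny gather over the enumerated combination list,
-- instead of A's single scatter pass that mutates an indexed result array.

-- shared helper: list(itertools.combinations(xs, k)) in lexicographic order (exact for nodup xs in order)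
def pvCombos : List Int → Nat → List (List Int)
  | _, 0 => [[]]
  | [], _ + 1 => []
  | x :: xs, k + 1 =>
    -- itertools.combinations is empty when r exceeds the pool length (documented short-circuit)
    if (x :: xs).length < k + 1 then []
    else (pvCombos xs k).map (x :: ·) ++ pvCombos xs (k + 1)

-- ===== PORT A =====
-- keys_to_distribute[bunny].append(key)
def pvAppendAt (acc : List (List Int)) (b : Int) (key : Int) : List (List Int) :=
  acc.mapIdx (fun i x => if (i : Int) = b then x ++ [key] else x)

-- the nested for-loop over enumerate(key_sets)
def pvScatter : List (List Int) → Int → List (List Int) → List (List Int)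
  | acc, _, [] => acc
  | acc, key, s :: rest => pvScatter (s.foldl (fun a b => pvAppendAt a b key) acc) (key + 1) rest

def solution (n_buns : Int) (n_req : Int) : List (List Int) :=
  let num_bunnies_per_key := n_buns - n_req + 1
  let keys_to_distribute := (PySem.List.pyRange 0 n_buns 1).map (fun _ => ([] : List Int))
  let key_sets := pvCombos (PySem.List.pyRange 0 n_buns 1) num_bunnies_per_key.toNat
  pvScatter keys_to_distribute 0 key_sets

-- ===== PORT B =====
def solution_alt (n_buns : Int) (n_req : Int) : List (List Int) :=
  let key_sets := pvCombos (PySem.List.pyRange 0 n_buns 1) (n_buns - n_req + 1).toNat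
  (PySem.List.pyRange 0 n_buns 1).map (fun b =>
    (PySem.List.enumerate key_sets 0).filterMap (fun p => if b ∈ p.2 then some p.1 else none))

-- ===== PRECONDITION & SPEC =====
-- Pre_ excludes exactly the inputs where combinations(..., r) gets a negative r and Python raises ValueError
def Pre_solution (n_buns : Int) (n_req : Int) : Prop := 0 ≤ n_buns - n_req + 1
instance (n_buns : Int) (n_req : Int) : Decidable (Pre_solution n_buns n_req) := by unfold Pre_solution; infer_instance
def pvWitness_solution : Int × Int := (4, 3)

def Spec_solution (n_buns : Int) (n_req : Int) (out : List (List Int)) : Prop := out = solution_alt n_buns n_req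
instance (n_buns : Int) (n_req : Int) (out : List (List Int)) : Decidable (Spec_solution n_buns n_req out) := by unfold Spec_solution; infer_instance

-- ===== CLAIM (what is proved, stated in full; the proofs are below) =====
def Claim_equal_solution : Prop := ∀ (n_buns : Int) (n_req : Int), Dom_solution n_buns n_req → Pre_solution n_buns n_req → Spec_solution n_buns n_req (solution n_buns n_req)

-- ===== LEMMAS AND PROOFS =====

-- what one bunny gathers from key_sets starting at index `key`
def pvGather (b : Int) : Int → List (List Int) → List Int
  | _, [] => []
  | key, s :: rest => (if b ∈ s then [key] else []) ++ pvGather b (key + 1) rest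

theorem pvGather_eq_filterMap (b : Int) (sets : List (List Int)) : ∀ (key : Int),
    (PySem.List.enumerate sets key).filterMap (fun p => if b ∈ p.2 then some p.1 else none)
      = pvGather b key sets := by
  induction sets with
  | nil => intro key; simp [PySem.List.enumerate, pvGather]
  | cons s rest ih =>
    intro key
    rw [PySem.List.enumerate_cons]
    simp only [List.filterMap_cons, pvGather, ih]
    by_cases h : b ∈ s <;> simp [h]

theorem pvCombos_sublist (xs : List Int) (k : Nat) : ∀ s ∈ pvCombos xs k, s.Sublist xs := by
  induction xs generalizing k with
  | nil => cases k <;> simp [pvCombos]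
  | cons x xs ih =>
    cases k with
    | zero => simp [pvCombos]
    | succ k =>
      intro s hs
      simp only [pvCombos] at hs
      split_ifs at hs with hlen
      · simp at hs
      simp only [List.mem_append, List.mem_map] at hs
      rcases hs with ⟨t, ht, rfl⟩ | hs
      · exact List.Sublist.cons₂ x (ih k t ht)
      · exact List.Sublist.cons x (ih (k + 1) s hs)

theorem pvFoldl_appendAt (key : Int) (s : List Int) (hnd : s.Nodup) : ∀ (acc : List (List Int)),
    s.foldl (fun a b => pvAppendAt a b key) acc
      = acc.mapIdx (fun i x => if (i : Int) ∈ s then x ++ [key] else x) := by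
  induction s with
  | nil =>
    intro acc
    simp only [List.foldl_nil, List.not_mem_nil, if_false]
    apply List.ext_getElem <;> simp
  | cons b t ih =>
    intro acc
    rcases List.nodup_cons.mp hnd with ⟨hb, ht⟩
    simp only [List.foldl_cons, ih ht]
    apply List.ext_getElem
    · simp [pvAppendAt]
    · intro i h1 h2
      simp only [List.getElem_mapIdx, pvAppendAt, List.mem_cons]
      by_cases hib : (i : Int) = b
      · simp [hib, hb]
      · simp [hib]

theorem pvScatter_eq (sets : List (List Int)) (hnd : ∀ s ∈ sets, s.Nodup) :
    ∀ (acc : List (List Int)) (key : Int),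
    pvScatter acc key sets = acc.mapIdx (fun i x => x ++ pvGather (i : Int) key sets) := by
  induction sets with
  | nil =>
    intro acc key
    simp only [pvScatter, pvGather]
    apply List.ext_getElem <;> simp
  | cons s rest ih =>
    intro acc key
    have hs : s.Nodup := hnd s (by simp)
    have hrest : ∀ t ∈ rest, t.Nodup := fun t ht => hnd t (by simp [ht])
    simp only [pvScatter, pvFoldl_appendAt key s hs, ih hrest]
    apply List.ext_getElem
    · simp
    · intro i h1 h2
      simp only [List.getElem_mapIdx, pvGather]
      by_cases h : (i : Int) ∈ s <;> simp [h]

-- ===== VERDICT (by name: the statement is the Claim_ definition above) =====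
theorem solution_spec : Claim_equal_solution := by
  intro n_buns n_req _ _
  unfold Spec_solution solution solution_alt
  set rng := PySem.List.pyRange 0 n_buns 1 with hrng
  have hnd : ∀ s ∈ pvCombos rng (n_buns - n_req + 1).toNat, s.Nodup := by
    intro s hs
    exact (pvCombos_sublist rng _ s hs).nodup (hrng ▸ PySem.List.nodup_pyRange_one 0 n_buns)
  rw [pvScatter_eq _ hnd]
  apply List.ext_getElem
  · simp
  · intro i h1 h2
    have hi : i < rng.length := by simpa using h1
    simp only [List.getElem_mapIdx, List.getElem_map, List.nil_append]
    rw [pvGather_eq_filterMap]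
    have : rng[i]'hi = (i : Int) := by
      simp only [hrng, PySem.List.getElem_pyRange_one]; ring
    rw [this]
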